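-- pv_equiv track=rewrite | github.com/minhduc5a15/utc_code | Python/xaudoixungchan.py | find_even_length_palindrome
-- ===== SOURCE A (Python) =====
-- def find_even_length_palindrome(N):
--     count = 0
--     num = 1
--     while True:
--         str_num = str(num)
--         palindrome = int(str_num + str_num[::-1])
--         count += 1
--         if count == N:
--             return palindrome
--         num += 1
-- ===== SOURCE B (Python) =====
-- def find_even_length_palindrome(N):
--     # closed form: the Nth even-length palindrome is N followed by its mirror
--     s = str(N)
--     return int(s + s[::-1])
-- ===== Notes on version B (the rewrite author's own statement) =====
-- stated objective: faster
-- what changed: Replaced the counting loop over 1..N (building and mirroring each number's string) by the closed form int(str(N)+str(N)[::-1]), since the Nth even-length palindrome is simply N concatenated with its own reverse.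
import Mathlib
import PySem

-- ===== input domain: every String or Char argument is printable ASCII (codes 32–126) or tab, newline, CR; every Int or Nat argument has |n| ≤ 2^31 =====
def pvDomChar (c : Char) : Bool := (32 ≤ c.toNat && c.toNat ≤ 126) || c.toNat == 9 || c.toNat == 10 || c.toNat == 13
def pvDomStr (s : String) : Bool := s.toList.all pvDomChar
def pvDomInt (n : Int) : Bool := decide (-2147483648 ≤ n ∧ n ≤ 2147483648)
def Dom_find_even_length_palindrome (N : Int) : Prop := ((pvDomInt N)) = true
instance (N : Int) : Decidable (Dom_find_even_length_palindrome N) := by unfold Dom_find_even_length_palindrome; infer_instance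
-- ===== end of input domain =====

-- ===== PORT A =====
-- B changes: closed-form mirror of N instead of A's loop counting up to N (objective: faster, measured).
-- A's 'while True' loop: count/num state, returns when count == N; it never terminates for N <= 0,
-- so totality here uses fuel = N.toNat (exhausted fuel is unreachable under Pre_).
-- int(str_num + str_num[::-1]) always parses (num >= 1), so ofStr? is defaulted with .getD 0.
def pvLoopA (N : Int) (num count : Int) : Nat → Int
  | 0 => 0
  | fuel + 1 =>
    let str_num := PySem.Int.toStr num
    let palindrome := (PySem.Int.ofStr? (str_num ++ String.ofList str_num.toList.reverse)).getD 0
    let count' := count + 1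
    if count' = N then palindrome
    else pvLoopA N (num + 1) count' fuel

def find_even_length_palindrome (N : Int) : Int := pvLoopA N 1 0 N.toNat

-- ===== PORT B =====
def find_even_length_palindrome_alt (N : Int) : Int :=
  let s := PySem.Int.toStr N
  (PySem.Int.ofStr? (s ++ String.ofList s.toList.reverse)).getD 0

-- ===== PRECONDITION & SPEC =====
-- Pre_ excludes N <= 0, where A's while-loop never meets count == N and diverges.
def Pre_find_even_length_palindrome (N : Int) : Prop := 1 ≤ N
instance (N : Int) : Decidable (Pre_find_even_length_palindrome N) := by unfold Pre_find_even_length_palindrome; infer_instance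
def pvWitness_find_even_length_palindrome : Int := 3

def Spec_find_even_length_palindrome (N : Int) (out : Int) : Prop := out = find_even_length_palindrome_alt N
instance (N : Int) (out : Int) : Decidable (Spec_find_even_length_palindrome N out) := by unfold Spec_find_even_length_palindrome; infer_instance

-- ===== CLAIM (what is proved, stated in full; the proofs are below) =====
def Claim_equal_find_even_length_palindrome : Prop := ∀ (N : Int), Dom_find_even_length_palindrome N → Pre_find_even_length_palindrome N → Spec_find_even_length_palindrome N (find_even_length_palindrome N)

-- ===== LEMMAS AND PROOFS =====

-- the value A's loop body computes for a given num (identical to B's expression at N)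
def pvMirror (num : Int) : Int :=
  let s := PySem.Int.toStr num
  (PySem.Int.ofStr? (s ++ String.ofList s.toList.reverse)).getD 0

-- loop invariant: with N = count + fuel and fuel >= 1, the loop returns the mirror of num + fuel - 1
theorem pvLoopA_eq (fuel : Nat) : ∀ (num count : Int), 1 ≤ fuel →
    pvLoopA (count + (fuel : Int)) num count fuel = pvMirror (num + (fuel : Int) - 1) := by
  induction fuel with
  | zero => intro _ _ h; omega
  | succ k ih =>
    intro num count _
    show (if count + 1 = count + ((k : Int) + 1) then _ else pvLoopA _ (num + 1) (count + 1) k) = _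
    by_cases hk : k = 0
    · subst hk; simp [pvMirror]
    · rw [if_neg (by omega)]
      have h1 : count + (((k : Nat) + 1 : Nat) : Int) = (count + 1) + (k : Int) := by
        push_cast; ring
      rw [h1, ih (num + 1) (count + 1) (by omega)]
      congr 1; push_cast; ring

-- ===== VERDICT (by name: the statement is the Claim_ definition above) =====
theorem find_even_length_palindrome_spec : Claim_equal_find_even_length_palindrome := by
  intro N _ hpre
  unfold Pre_find_even_length_palindrome at hpre
  unfold Spec_find_even_length_palindrome find_even_length_palindrome
  have hN : N = 0 + (N.toNat : Int) := by omega
  rw [show pvLoopA N 1 0 N.toNat = pvLoopA (0 + (N.toNat : Int)) 1 0 N.toNat from by rw [← hN]]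
  rw [pvLoopA_eq N.toNat 1 0 (by omega)]
  have : (1 : Int) + (N.toNat : Int) - 1 = N := by omega
  rw [this]; rfl
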